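-- pv_equiv track=rewrite | github.com/xziyue/latex3-tutorial-latex-source | tex_lexer.py | find_n_th_letter_index
-- ===== SOURCE A (Python) =====
-- def find_n_th_letter_index(segment, n):
--     count = 0
--     for i in range(len(segment)):
--         if len(segment[i]) > 0 and (segment[i][0] == '@' or segment[i][0].isalpha()):
--             if count == n:
--                 return i
--             count += 1
--
--     return -1  # No letter found
-- ===== SOURCE B (Python) =====
-- def find_n_th_letter_index(segment, n):
--     def good(s):
--         return bool(s) and (s[0] == '@' or s[0].isalpha())
--
--     def rec(seg, base, k):
--         # find absolute index of the k-th good element of seg, whose first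
--         # element sits at absolute position base; -1 if there is no such one
--         if not seg:
--             return -1
--         if len(seg) == 1:
--             return base if k == 0 and good(seg[0]) else -1
--         mid = len(seg) // 2
--         left, right = seg[:mid], seg[mid:]
--         c = sum(map(good, left))
--         return rec(left, base, k) if k < c else rec(right, base + mid, k - c)
--
--     return rec(segment, 0, n)
-- ===== Notes on version B (the rewrite author's own statement) =====
-- stated objective: alternative
-- what changed: Replaces A's single left-to-right scan with a running counter by a divide-and-conquer search: split the segment in half, count qualifying strings in the left half, and recurse into the half that contains the n-th hit.
import Mathlib
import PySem

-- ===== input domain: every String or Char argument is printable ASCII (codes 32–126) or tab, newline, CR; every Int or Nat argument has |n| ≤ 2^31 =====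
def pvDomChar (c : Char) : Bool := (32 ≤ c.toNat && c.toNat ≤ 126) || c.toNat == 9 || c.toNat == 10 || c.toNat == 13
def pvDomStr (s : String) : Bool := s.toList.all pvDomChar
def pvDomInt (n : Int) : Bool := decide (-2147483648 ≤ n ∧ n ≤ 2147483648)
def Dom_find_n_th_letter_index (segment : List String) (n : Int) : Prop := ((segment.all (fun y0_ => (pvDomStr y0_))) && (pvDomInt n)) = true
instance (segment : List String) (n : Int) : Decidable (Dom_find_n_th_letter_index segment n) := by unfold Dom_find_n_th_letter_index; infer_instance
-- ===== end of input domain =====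

-- B replaces A's single left-to-right counting scan by a divide-and-conquer search:
-- count qualifying strings in the left half and recurse into the half holding the
-- n-th hit (objective: alternative; same O(n) cost; return value only).

-- ===== PORT A =====
-- 'len(segment[i]) > 0 and (segment[i][0] == "@" or segment[i][0].isalpha())'
def pvQualA (s : String) : Bool :=
  decide (0 < PySem.Str.len s) &&
    (match PySem.Str.pyGet? s 0 with
     | some c => c == '@' || PySem.Chars.isalpha c
     | none => false)

-- the 'for i in range(len(segment))' loop with its running count and early return
def pvLoopA (n : Int) : List String → Int → Int → Int
  | [], _, _ => -1
  | s :: rest, i, c =>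
    if pvQualA s then
      (if c = n then i else pvLoopA n rest (i + 1) (c + 1))
    else pvLoopA n rest (i + 1) c

def find_n_th_letter_index (segment : List String) (n : Int) : Int :=
  pvLoopA n segment 0 0

-- ===== PORT B =====
-- 'bool(s) and (s[0] == "@" or s[0].isalpha())'
def pvGoodB (s : String) : Bool :=
  !s.toList.isEmpty &&
    (match PySem.Str.pyGet? s 0 with
     | some c => c == '@' || PySem.Chars.isalpha c
     | none => false)

-- 'def rec(seg, base, k)': divide and conquer on the sub-segment
def pvRecB : List String → Int → Int → Int
  | [], _, _ => -1
  | [s], base, k => if k = 0 ∧ pvGoodB s then base else -1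
  | s1 :: s2 :: rest, base, k =>
    let seg := s1 :: s2 :: rest
    let mid := seg.length / 2
    let left := seg.take mid
    let right := seg.drop mid
    let c : Int := left.countP pvGoodB          -- sum(map(good, left))
    if k < c then pvRecB left base k else pvRecB right (base + (mid : Int)) (k - c)
termination_by seg _ _ => seg.length
decreasing_by
  · simp; omega
  · simp; omega

def find_n_th_letter_index_alt (segment : List String) (n : Int) : Int :=
  pvRecB segment 0 n

-- ===== PRECONDITION & SPEC =====
def Spec_find_n_th_letter_index (segment : List String) (n : Int) (out : Int) : Prop := out = find_n_th_letter_index_alt segment n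
instance (segment : List String) (n : Int) (out : Int) : Decidable (Spec_find_n_th_letter_index segment n out) := by unfold Spec_find_n_th_letter_index; infer_instance

-- ===== CLAIM (what is proved, stated in full; the proofs are below) =====
def Claim_equal_find_n_th_letter_index : Prop := ∀ (segment : List String) (n : Int), Dom_find_n_th_letter_index segment n → Spec_find_n_th_letter_index segment n (find_n_th_letter_index segment n)

-- ===== LEMMAS AND PROOFS =====

-- absolute indices of the qualifying elements of seg, first element at position i
def pvHitsFrom (seg : List String) (i : Int) : List Int :=
  (PySem.List.enumerate seg i).filterMap (fun p => if pvGoodB p.2 then some p.1 else none)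

-- bounds-checked lookup into the hit table (the common denominator of both programs)
def pvLook (seg : List String) (base k : Int) : Int :=
  if 0 ≤ k ∧ k < ((pvHitsFrom seg base).length : Int)
  then (pvHitsFrom seg base).getD k.toNat (-1) else -1

theorem pvQualA_eq_pvGoodB (s : String) : pvQualA s = pvGoodB s := by
  cases h : s.toList with
  | nil => simp [pvQualA, pvGoodB, h]
  | cons c cs => simp [pvQualA, pvGoodB, h]

theorem pvHitsFrom_append (l r : List String) (i : Int) :
    pvHitsFrom (l ++ r) i = pvHitsFrom l i ++ pvHitsFrom r (i + l.length) := by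
  simp [pvHitsFrom, PySem.List.enumerate_append]

theorem length_pvHitsFrom (seg : List String) (i : Int) :
    (pvHitsFrom seg i).length = seg.countP pvGoodB := by
  induction seg generalizing i with
  | nil => simp [pvHitsFrom, PySem.List.enumerate_nil]
  | cons s rest ih =>
    simp only [pvHitsFrom, PySem.List.enumerate_cons, List.filterMap_cons] at ih ⊢
    by_cases h : pvGoodB s = true <;> simp [h, ih]

-- positive / negative cons steps of the hit table
theorem pvHitsFrom_cons_pos (s : String) (rest : List String) (i : Int)
    (hq : pvGoodB s = true) :
    pvHitsFrom (s :: rest) i = i :: pvHitsFrom rest (i + 1) := by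
  simp [pvHitsFrom, PySem.List.enumerate_cons, hq]

theorem pvHitsFrom_cons_neg (s : String) (rest : List String) (i : Int)
    (hq : pvGoodB s = false) :
    pvHitsFrom (s :: rest) i = pvHitsFrom rest (i + 1) := by
  simp [pvHitsFrom, PySem.List.enumerate_cons, hq]

-- A's loop computes the (n - c)-th entry of the hit table (shifted by the running count c)
theorem pvLoopA_eq (n : Int) (seg : List String) (i c : Int) :
    pvLoopA n seg i c =
      (if c ≤ n ∧ n - c < ((pvHitsFrom seg i).length : Int)
       then (pvHitsFrom seg i).getD (n - c).toNat (-1) else -1) := by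
  induction seg generalizing i c with
  | nil =>
    simp only [pvLoopA, pvHitsFrom, PySem.List.enumerate_nil, List.filterMap_nil,
      List.length_nil, Nat.cast_zero]
    rw [if_neg (by omega)]
  | cons s rest ih =>
    cases hq : pvGoodB s with
    | false =>
      rw [pvHitsFrom_cons_neg s rest i hq]
      simp only [pvLoopA, pvQualA_eq_pvGoodB, hq, Bool.false_eq_true, if_false]
      exact ih (i + 1) c
    | true =>
      rw [pvHitsFrom_cons_pos s rest i hq]
      simp only [pvLoopA, pvQualA_eq_pvGoodB, hq, if_true]
      by_cases hc : c = n
      · subst hc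
        rw [if_pos rfl, if_pos ⟨le_refl c, by simp only [List.length_cons]; push_cast; omega⟩]
        have h0 : (c - c).toNat = 0 := by omega
        rw [h0, List.getD_cons_zero]
      · rw [if_neg hc, ih]
        by_cases hcn : c + 1 ≤ n ∧ n - (c + 1) < ((pvHitsFrom rest (i + 1)).length : Int)
        · rw [if_pos hcn, if_pos (by simp only [List.length_cons]; push_cast; omega)]
          obtain ⟨m, hm⟩ : ∃ m, (n - c).toNat = m + 1 := ⟨(n - (c + 1)).toNat, by omega⟩
          rw [hm, List.getD_cons_succ]
          congr 1
          omega
        · rw [if_neg hcn, if_neg (by simp only [List.length_cons]; push_cast; omega)]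

-- the lookup splits at any cut point exactly the way B's recursion does
theorem pvLook_append (l r : List String) (base k : Int) :
    pvLook (l ++ r) base k =
      (if k < (l.countP pvGoodB : Int) then pvLook l base k
       else pvLook r (base + l.length) (k - (l.countP pvGoodB : Int))) := by
  have hl := length_pvHitsFrom l base
  have hr := length_pvHitsFrom r (base + l.length)
  unfold pvLook
  rw [pvHitsFrom_append, List.length_append]
  by_cases hk : k < (l.countP pvGoodB : Int)
  · rw [if_pos hk]
    by_cases h0 : 0 ≤ k
    · rw [if_pos ⟨h0, by push_cast; omega⟩, if_pos ⟨h0, by omega⟩,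
        List.getD_append _ _ _ _ (by omega)]
    · rw [if_neg (fun h => h0 h.1), if_neg (fun h => h0 h.1)]
  · rw [if_neg hk]
    by_cases hub : k - (l.countP pvGoodB : Int) <
        ((pvHitsFrom r (base + l.length)).length : Int)
    · rw [if_pos ⟨by omega, by push_cast; omega⟩, if_pos ⟨by omega, hub⟩,
        List.getD_append_right _ _ _ _ (by omega)]
      congr 1
      omega
    · rw [if_neg (by omega), if_neg (by omega)]

-- B's divide-and-conquer recursion computes the table lookup
theorem pvRecB_eq (seg : List String) (base k : Int) :
    pvRecB seg base k = pvLook seg base k := by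
  match seg with
  | [] =>
    unfold pvLook pvHitsFrom
    simp only [pvRecB, PySem.List.enumerate_nil, List.filterMap_nil, List.length_nil,
      Nat.cast_zero]
    rw [if_neg (by omega)]
  | [s] =>
    unfold pvLook
    have hnil : pvHitsFrom [] (base + 1) = [] := by
      simp [pvHitsFrom, PySem.List.enumerate_nil]
    cases hq : pvGoodB s with
    | true =>
      rw [pvHitsFrom_cons_pos s [] base hq, hnil]
      simp only [pvRecB, hq, and_true]
      by_cases hk : k = 0
      · subst hk; simp
      · rw [if_neg hk,
          if_neg (by simp only [List.length_cons, List.length_nil]; push_cast; omega)]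
    | false =>
      rw [pvHitsFrom_cons_neg s [] base hq, hnil]
      simp only [pvRecB, hq, Bool.false_eq_true, and_false, if_false]
      rw [if_neg (by simp only [List.length_nil]; push_cast; omega)]
  | s1 :: s2 :: rest =>
    have ihl := pvRecB_eq ((s1 :: s2 :: rest).take ((s1 :: s2 :: rest).length / 2)) base k
    have ihr := pvRecB_eq ((s1 :: s2 :: rest).drop ((s1 :: s2 :: rest).length / 2))
      (base + (((s1 :: s2 :: rest).length / 2 : Nat) : Int))
      (k - ((((s1 :: s2 :: rest).take ((s1 :: s2 :: rest).length / 2)).countP pvGoodB : Nat) : Int))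
    have hltake : ((s1 :: s2 :: rest).take ((s1 :: s2 :: rest).length / 2)).length
        = (s1 :: s2 :: rest).length / 2 := by
      rw [List.length_take]
      omega
    simp only [pvRecB]
    rw [ihl, ihr]
    conv_rhs => rw [show (s1 :: s2 :: rest)
      = (s1 :: s2 :: rest).take ((s1 :: s2 :: rest).length / 2)
        ++ (s1 :: s2 :: rest).drop ((s1 :: s2 :: rest).length / 2) from
      (List.take_append_drop _ _).symm]
    rw [pvLook_append, hltake]
termination_by seg.length
decreasing_by all_goals (simp [List.length_take, List.length_drop]; omega)

-- ===== VERDICT (by name: the statement is the Claim_ definition above) =====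
theorem find_n_th_letter_index_spec : Claim_equal_find_n_th_letter_index := by
  intro segment n _
  unfold Spec_find_n_th_letter_index find_n_th_letter_index find_n_th_letter_index_alt
  rw [pvLoopA_eq, pvRecB_eq]
  unfold pvLook
  have h0 : n - 0 = n := by omega
  rw [h0]
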